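-- pv_equiv track=rewrite | github.com/Roman-R2/registry_viewer | mainapp/services.py | _find_patterning_substring_indexes
-- ===== SOURCE A (Python) =====
-- def _find_patterning_substring_indexes(line: str):
--     """ Найдет индексы начала и конца подстроки для обработки. """
--     start = -1
--     end = -1
--     for i, char in enumerate(line):
--         if line[i] == '"' and line[i - 1] == ';':
--             start = i
--             break
--     for i, char in enumerate(line):
--         if line[i] == '"' and line[i + 1] == ';':
--             # если старт там же где и конец, то это была строка вида
--             # ;";char";
--             # поэтому ищем дальше
--             if start == i:
--                 continue
--             end = i
--             break
--     if start == -1 or end == -1: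
--         start = -1
--         end = -1
--     return start, end
-- ===== SOURCE B (Python) =====
-- def _find_patterning_substring_indexes(line: str):
--     """ Найдет индексы начала и конца подстроки для обработки. """
--     start = -1
--     end = -1
--     for i in range(len(line)):
--         if start == -1 and line[i] == '"' and line[i - 1] == ';':
--             start = i
--         if end == -1 and line[i] == '"' and line[i + 1] == ';' and i != start:
--             end = i
--         if start != -1 and end != -1:
--             break
--     if start == -1 or end == -1:
--         return -1, -1
--     return start, end
-- ===== Notes on version B (the rewrite author's own statement) =====
-- stated objective: alternative
-- what changed: One interleaved pass over the indices maintains both start and end (with one early exit once both are found) instead of A's two separate scans of the line, using an invariant that the not-yet-found start behaves like the final start for the skip test.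
import Mathlib
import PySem

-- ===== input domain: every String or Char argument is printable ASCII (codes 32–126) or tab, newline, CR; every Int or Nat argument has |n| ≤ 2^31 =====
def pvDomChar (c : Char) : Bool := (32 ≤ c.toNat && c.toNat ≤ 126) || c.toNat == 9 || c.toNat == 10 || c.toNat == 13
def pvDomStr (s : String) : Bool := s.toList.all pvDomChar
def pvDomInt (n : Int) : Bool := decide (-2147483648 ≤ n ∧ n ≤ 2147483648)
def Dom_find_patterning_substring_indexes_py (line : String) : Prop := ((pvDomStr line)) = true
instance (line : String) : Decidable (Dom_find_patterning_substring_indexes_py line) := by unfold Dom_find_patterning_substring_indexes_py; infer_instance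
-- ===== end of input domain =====

-- B replaces A's two sequential scans by one interleaved pass maintaining both indexes with a
-- single early exit; same values and same IndexError domain (excluded by Pre_); no speed claim.


-- ===== PORT A =====
-- A's first loop: first i with line[i] == '"' and line[i-1] == ';' (Python negative-index
-- wraparound at i = 0 is kept by pyGet?), else -1.
def loopStartA (cs : List Char) : List Nat → Int
  | [] => -1
  | i :: rest =>
    if PySem.List.pyGet? cs (i : Int) = some '"' ∧ PySem.List.pyGet? cs ((i : Int) - 1) = some ';' then
      (i : Int)
    else loopStartA cs rest

-- A's second loop: first i with line[i] == '"' and line[i+1] == ';' skipping i == start;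
-- none = IndexError from line[i+1] at the last position (excluded by Pre_).
def loopEndA (cs : List Char) (start : Int) : List Nat → Option Int
  | [] => some (-1)
  | i :: rest =>
    if PySem.List.pyGet? cs (i : Int) = some '"' then
      match PySem.List.pyGet? cs ((i : Int) + 1) with
      | none => none
      | some c =>
        if c = ';' then
          if start = (i : Int) then loopEndA cs start rest else some (i : Int)
        else loopEndA cs start rest
    else loopEndA cs start rest

def find_patterning_substring_indexes_py (line : String) : Int × Int :=
  let cs := line.toList
  let start := loopStartA cs (List.range cs.length)
  match loopEndA cs start (List.range cs.length) with
  | none => (-2, -2)   -- IndexError; unreachable under Pre_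
  | some e => if start = -1 ∨ e = -1 then (-1, -1) else (start, e)

-- ===== PORT B =====
-- B's single pass, carrying (start, end) and exiting once both are found;
-- none = IndexError from line[i+1] (excluded by Pre_).
def loopB (cs : List Char) : List Nat → Int → Int → Option (Int × Int)
  | [], s, e => some (s, e)
  | i :: rest, s, e =>
    let s' := if s = -1 ∧ PySem.List.pyGet? cs (i : Int) = some '"' ∧ PySem.List.pyGet? cs ((i : Int) - 1) = some ';' then (i : Int) else s
    if e = -1 ∧ PySem.List.pyGet? cs (i : Int) = some '"' then
      match PySem.List.pyGet? cs ((i : Int) + 1) with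
      | none => none
      | some c =>
        let e' := if c = ';' ∧ (i : Int) ≠ s' then (i : Int) else e
        if s' ≠ -1 ∧ e' ≠ -1 then some (s', e') else loopB cs rest s' e'
    else
      if s' ≠ -1 ∧ e ≠ -1 then some (s', e) else loopB cs rest s' e

def find_patterning_substring_indexes_py_alt (line : String) : Int × Int :=
  let cs := line.toList
  match loopB cs (List.range cs.length) (-1) (-1) with
  | none => (-3, -3)   -- IndexError; unreachable under Pre_
  | some (s, e) => if s = -1 ∨ e = -1 then (-1, -1) else (s, e)

-- ===== PRECONDITION & SPEC =====
-- "i is A's start": line[i] == '"' and line[i-1] == ';' with Python's wraparound at i = 0.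
abbrev predStart (cs : List Char) (i : Nat) : Prop :=
  cs[i]? = some '"' ∧ (if i = 0 then cs[cs.length - 1]? else cs[i - 1]?) = some ';'

-- Pre_ excludes exactly the inputs on which A raises IndexError (indexing line[i+1] at the
-- last position): the line ends with a double quote and every earlier quote-then-semicolon
-- pair sits exactly at the first start index, so A's second loop never breaks early.
def Pre_find_patterning_substring_indexes_py (line : String) : Prop :=
  ¬ (line.toList ≠ [] ∧ line.toList[line.toList.length - 1]? = some '"' ∧
      ∀ i < line.toList.length,
        (i + 1 < line.toList.length ∧ line.toList[i]? = some '"' ∧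
          line.toList[i + 1]? = some ';') →
        (predStart line.toList i ∧ ∀ j < i, ¬ predStart line.toList j))

instance (line : String) : Decidable (Pre_find_patterning_substring_indexes_py line) := by
  unfold Pre_find_patterning_substring_indexes_py; infer_instance

def pvWitness_find_patterning_substring_indexes_py : String := ";\"x\";"

def Spec_find_patterning_substring_indexes_py (line : String) (out : Int × Int) : Prop := out = find_patterning_substring_indexes_py_alt line
instance (line : String) (out : Int × Int) : Decidable (Spec_find_patterning_substring_indexes_py line out) := by unfold Spec_find_patterning_substring_indexes_py; infer_instance

-- ===== CLAIM (what is proved, stated in full; the proofs are below) =====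
def Claim_equal_find_patterning_substring_indexes_py : Prop := ∀ (line : String), Dom_find_patterning_substring_indexes_py line → Pre_find_patterning_substring_indexes_py line → Spec_find_patterning_substring_indexes_py line (find_patterning_substring_indexes_py line)

-- ===== LEMMAS AND PROOFS =====

lemma predStart_iff (cs : List Char) (i : Nat) :
    predStart cs i ↔ (cs[i]? = some '"' ∧ PySem.List.pyGet? cs ((i : Int) - 1) = some ';') := by
  unfold predStart
  cases i with
  | zero =>
    simp [PySem.List.pyGet?_neg_one, List.getLast?_eq_getElem?]
  | succ k =>
    rw [show ((k + 1 : Nat) : Int) - 1 = ((k : Nat) : Int) from by push_cast; ring]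
    simp

lemma loopStartA_mem (cs : List Char) :
    ∀ l : List Nat, loopStartA cs l = -1 ∨ ∃ j ∈ l, loopStartA cs l = (j : Int) := by
  intro l
  induction l with
  | nil => left; rfl
  | cons i rest ih =>
    by_cases h : cs[i]? = some '"' ∧ PySem.List.pyGet? cs ((i : Int) - 1) = some ';'
    · right; exact ⟨i, List.mem_cons_self, by simp [loopStartA, h]⟩
    · rcases ih with h1 | ⟨j, hj, hj2⟩
      · left; simp [loopStartA, h, h1]
      · right; exact ⟨j, List.mem_cons_of_mem _ hj, by simp [loopStartA, h, hj2]⟩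

lemma loopStartA_first (cs : List Char) :
    ∀ l : List Nat, l.Pairwise (· < ·) → ∀ i : Nat, loopStartA cs l = (i : Int) →
      (cs[i]? = some '"' ∧ PySem.List.pyGet? cs ((i : Int) - 1) = some ';') ∧
      ∀ j ∈ l, j < i →
        ¬ (cs[j]? = some '"' ∧ PySem.List.pyGet? cs ((j : Int) - 1) = some ';') := by
  intro l
  induction l with
  | nil => intro _ i h; simp [loopStartA] at h
  | cons a rest ih =>
    intro hpw i h
    by_cases ha : cs[a]? = some '"' ∧ PySem.List.pyGet? cs ((a : Int) - 1) = some ';'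
    · simp [loopStartA, ha] at h
      have hai : a = i := by exact_mod_cast h
      subst hai
      refine ⟨ha, ?_⟩
      intro j hj hji
      rcases List.mem_cons.mp hj with rfl | hj'
      · omega
      · exact absurd (List.rel_of_pairwise_cons hpw hj') (by omega)
    · simp only [loopStartA] at h
      rw [if_neg (by simpa using ha)] at h
      obtain ⟨h1, h2⟩ := ih (List.Pairwise.of_cons hpw) i h
      refine ⟨h1, ?_⟩
      intro j hj hji
      rcases List.mem_cons.mp hj with rfl | hj'
      · exact ha
      · exact h2 j hj' hji

-- loopStartA of a cons whose head fails the test cannot return the head index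
lemma loopStartA_ne_head (cs : List Char) (i : Nat) (rest : List Nat)
    (hpw : (i :: rest).Pairwise (· < ·))
    (h1 : loopStartA cs rest = (i : Int)) : False := by
  rcases loopStartA_mem cs rest with h2 | ⟨j, hj, hj2⟩
  · rw [h1] at h2; omega
  · rw [h1] at hj2
    have : i = j := by exact_mod_cast hj2
    subst this
    exact absurd (List.rel_of_pairwise_cons hpw hj) (by omega)

lemma loopEndA_none (cs : List Char) (st : Int) :
    ∀ l : List Nat, l.Pairwise (· < ·) → loopEndA cs st l = none →
      ∃ i ∈ l, cs[i]? = some '"' ∧ PySem.List.pyGet? cs ((i : Int) + 1) = none ∧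
        ∀ j ∈ l, j < i → cs[j]? = some '"' →
          PySem.List.pyGet? cs ((j : Int) + 1) = some ';' → st = (j : Int) := by
  intro l
  induction l with
  | nil => intro _ h; simp [loopEndA] at h
  | cons a rest ih =>
    intro hpw h
    by_cases ha : cs[a]? = some '"'
    · cases hn : PySem.List.pyGet? cs ((a : Int) + 1) with
      | none =>
        refine ⟨a, List.mem_cons_self, ha, hn, ?_⟩
        intro j hj hji _ _
        rcases List.mem_cons.mp hj with rfl | hj'
        · omega
        · exact absurd (List.rel_of_pairwise_cons hpw hj') (by omega)
      | some c =>
        by_cases hc : c = ';'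
        · subst hc
          by_cases hst : st = (a : Int)
          · have h' : loopEndA cs st rest = none := by
              simpa [loopEndA, ha, hn, hst] using h
            obtain ⟨i, hi, hq, hnone, hall⟩ := ih (List.Pairwise.of_cons hpw) h'
            refine ⟨i, List.mem_cons_of_mem _ hi, hq, hnone, ?_⟩
            intro j hj hji h1 h2
            rcases List.mem_cons.mp hj with rfl | hj'
            · exact hst
            · exact hall j hj' hji h1 h2
          · exfalso
            have hsome : loopEndA cs st (a :: rest) = some (a : Int) := by
              simp [loopEndA, ha, hn, hst]
            rw [hsome] at h; exact absurd h (by simp)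
        · have h' : loopEndA cs st rest = none := by
            simpa [loopEndA, ha, hn, hc] using h
          obtain ⟨i, hi, hq, hnone, hall⟩ := ih (List.Pairwise.of_cons hpw) h'
          refine ⟨i, List.mem_cons_of_mem _ hi, hq, hnone, ?_⟩
          intro j hj hji h1 h2
          rcases List.mem_cons.mp hj with rfl | hj'
          · rw [hn] at h2
            exact absurd h2 (by simp [hc])
          · exact hall j hj' hji h1 h2
    · have h' : loopEndA cs st rest = none := by simpa [loopEndA, ha] using h
      obtain ⟨i, hi, hq, hnone, hall⟩ := ih (List.Pairwise.of_cons hpw) h'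
      refine ⟨i, List.mem_cons_of_mem _ hi, hq, hnone, ?_⟩
      intro j hj hji h1 h2
      rcases List.mem_cons.mp hj with rfl | hj'
      · exact absurd h1 ha
      · exact hall j hj' hji h1 h2

-- The key invariant: B's single pass with current state (s, e) computes A's two-loop result,
-- where st is A's final start and s is -1 (not yet found) or st itself.
lemma loopB_eq (cs : List Char) (st : Int) :
    ∀ l : List Nat, ∀ s e : Int, l.Pairwise (· < ·) →
      (s = -1 ∨ (s = st ∧ s ≠ -1)) →
      (s = -1 → loopStartA cs l = st) →
      (e = -1 ∨ s = -1) →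
      loopB cs l s e =
        (match (if e = -1 then loopEndA cs st l else some e) with
         | none => none
         | some eF => some ((if s = -1 then loopStartA cs l else s), eF)) := by
  intro l
  induction l with
  | nil =>
    intro s e _ hs hs2 he
    by_cases heq : e = -1
    · subst heq
      rcases hs with rfl | ⟨hseq, hs1⟩
      · simp [loopB, loopEndA, loopStartA]
      · simp [loopB, loopEndA, hs1]
    · have hs0 : s = -1 := he.resolve_left heq
      subst hs0
      simp [loopB, loopStartA, heq]
  | cons i rest ih =>
    intro s e hpw hs hs2 he
    have hpw' := List.Pairwise.of_cons hpw
    have hine : ((i : Nat) : Int) ≠ -1 := by omega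
    by_cases hQ : cs[i]? = some '"'
    · by_cases heq : e = -1
      · subst heq
        cases hN : PySem.List.pyGet? cs ((i : Int) + 1) with
        | none =>
          simp [loopB, loopEndA, hQ, hN]
        | some c =>
          by_cases hc : c = ';'
          · subst hc
            rcases hs with rfl | ⟨hseq, hs1⟩
            · by_cases hP : PySem.List.pyGet? cs ((i : Int) - 1) = some ';'
              · have hsti : loopStartA cs (i :: rest) = (i : Int) := by
                  simp [loopStartA, hQ, hP]
                have hstv : st = (i : Int) := by rw [← hs2 rfl, hsti]
                have hrec := ih ((i : Nat) : Int) (-1) hpw'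
                  (Or.inr ⟨hstv.symm, hine⟩) (fun h => absurd h hine) (Or.inl rfl)
                simp [loopB, loopEndA, hQ, hP, hN, hstv, hsti, hine, hrec]
              · by_cases hsti : st = (i : Int)
                · exfalso
                  have h0 := hs2 rfl
                  rw [hsti] at h0
                  simp only [loopStartA] at h0
                  rw [if_neg (by simp [hP])] at h0
                  exact loopStartA_ne_head cs i rest hpw h0
                · have hst2 : loopStartA cs rest = st := by
                    have h0 := hs2 rfl
                    simp only [loopStartA] at h0
                    rwa [if_neg (by simp [hP])] at h0
                  have hrec := ih (-1) ((i : Nat) : Int) hpw'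
                    (Or.inl rfl) (fun _ => hst2) (Or.inr rfl)
                  simp [loopB, loopEndA, loopStartA, hQ, hP, hN, hsti, hine, hrec]
            · by_cases hsti : st = (i : Int)
              · subst hsti
                subst hseq
                have hrec := ih ((i : Nat) : Int) (-1) hpw'
                  (Or.inr ⟨rfl, hine⟩) (fun h => absurd h hine) (Or.inl rfl)
                simp [loopB, loopEndA, hQ, hN, hine, hrec]
              · have hne : ((i : Nat) : Int) ≠ s := fun h => hsti ((h ▸ hseq).symm)
                simp [loopB, loopEndA, hQ, hN, hs1, hsti, hne, hine]
          · rcases hs with rfl | ⟨hseq, hs1⟩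
            · by_cases hP : PySem.List.pyGet? cs ((i : Int) - 1) = some ';'
              · have hsti : loopStartA cs (i :: rest) = (i : Int) := by
                  simp [loopStartA, hQ, hP]
                have hstv : st = (i : Int) := by rw [← hs2 rfl, hsti]
                have hrec := ih ((i : Nat) : Int) (-1) hpw'
                  (Or.inr ⟨hstv.symm, hine⟩) (fun h => absurd h hine) (Or.inl rfl)
                simp [loopB, loopEndA, hQ, hP, hN, hc, hstv, hsti, hine, hrec]
              · have hst2 : loopStartA cs rest = st := by
                  have h0 := hs2 rfl
                  simp only [loopStartA] at h0
                  rwa [if_neg (by simp [hP])] at h0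
                have hrec := ih (-1) (-1) hpw' (Or.inl rfl) (fun _ => hst2) (Or.inl rfl)
                simp [loopB, loopEndA, loopStartA, hQ, hP, hN, hc, hrec]
            · have hrec := ih s (-1) hpw'
                (Or.inr ⟨hseq, hs1⟩) (fun h => absurd h hs1) (Or.inl rfl)
              simp [loopB, loopEndA, hQ, hN, hc, hs1, hrec]
      · have hs0 : s = -1 := he.resolve_left heq
        subst hs0
        by_cases hP : PySem.List.pyGet? cs ((i : Int) - 1) = some ';'
        · have hsti : loopStartA cs (i :: rest) = (i : Int) := by
            simp [loopStartA, hQ, hP]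
          simp [loopB, hQ, hP, heq, hine, hsti]
        · have hst2 : loopStartA cs rest = st := by
            have h0 := hs2 rfl
            simp only [loopStartA] at h0
            rwa [if_neg (by simp [hP])] at h0
          have hrec := ih (-1) e hpw' (Or.inl rfl) (fun _ => hst2) (Or.inr rfl)
          simp [loopB, loopStartA, hQ, hP, heq, hrec]
    · have hrec := ih s e hpw' hs
        (fun h1 => by
          have h0 := hs2 h1
          simp only [loopStartA] at h0
          rwa [if_neg (by simp [hQ])] at h0) he
      by_cases heq : e = -1
      · subst heq
        simp [loopB, loopEndA, loopStartA, hQ, hrec]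
      · have hs0 : s = -1 := he.resolve_left heq
        subst hs0
        simp [loopB, loopStartA, hQ, heq, hrec]

-- ===== VERDICT (by name: the statement is the Claim_ definition above) =====
theorem find_patterning_substring_indexes_py_spec : Claim_equal_find_patterning_substring_indexes_py := by
  intro line hdom hpre
  unfold Spec_find_patterning_substring_indexes_py
  show find_patterning_substring_indexes_py line = find_patterning_substring_indexes_py_alt line
  unfold find_patterning_substring_indexes_py find_patterning_substring_indexes_py_alt
  have hpw : (List.range line.toList.length).Pairwise (· < ·) := List.pairwise_lt_range
  have hmain := loopB_eq line.toList (loopStartA line.toList (List.range line.toList.length))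
      (List.range line.toList.length) (-1) (-1) hpw (Or.inl rfl) (fun _ => rfl) (Or.inl rfl)
  cases hE : loopEndA line.toList (loopStartA line.toList (List.range line.toList.length))
      (List.range line.toList.length) with
  | none =>
    exfalso
    apply hpre
    obtain ⟨i, hi, hq, hnone, hall⟩ := loopEndA_none _ _ _ hpw hE
    have hin : i < line.toList.length := List.mem_range.mp hi
    have hlen : line.toList.length ≤ i + 1 := by
      rw [show ((i : Nat) : Int) + 1 = ((i + 1 : Nat) : Int) from by push_cast; ring,
        PySem.List.pyGet?_natCast, List.getElem?_eq_none_iff] at hnone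
      exact hnone
    refine ⟨?_, ?_, ?_⟩
    · intro hnil; rw [hnil] at hin; simp at hin
    · rw [show line.toList.length - 1 = i from by omega]; exact hq
    · rintro k hk ⟨hk1, hq', hsemi⟩
      have hks : loopStartA line.toList (List.range line.toList.length) = (k : Int) :=
        hall k (List.mem_range.mpr hk) (by omega) hq'
          (by rw [show ((k : Nat) : Int) + 1 = ((k + 1 : Nat) : Int) from by push_cast; ring,
                PySem.List.pyGet?_natCast]; exact hsemi)
      obtain ⟨hC, hmin⟩ := loopStartA_first _ _ hpw k hks
      refine ⟨(predStart_iff _ _).mpr hC, ?_⟩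
      intro j hj hps
      exact hmin j (List.mem_range.mpr (by omega)) hj ((predStart_iff _ _).mp hps)
  | some eF =>
    rw [hE] at hmain
    simp only [reduceIte] at hmain
    simp only [hE, hmain]
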